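-- pv_equiv track=rewrite | github.com/HreshchyshynT/advent-of-code-2023 | main.py | read_digit
-- ===== SOURCE A (Python) =====
-- from typing import Optional
--
-- spelled = {
--     "one": 1,
--     "two": 2,
--     "three": 3,
--     "four": 4,
--     "five": 5,
--     "six": 6,
--     "seven": 7,
--     "eight": 8,
--     "nine": 9,
-- }
--
-- def read_digit(s: str) -> Optional[int]:
--     buffer = ""
--     end = min(5, len(s))
--     for j in range(end):
--         buffer += s[j]
--         if spelled.get(buffer):
--             return spelled.get(buffer)
--     return None
-- ===== SOURCE B (Python) =====
-- from typing import Optional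
--
-- spelled = {
--     "one": 1,
--     "two": 2,
--     "three": 3,
--     "four": 4,
--     "five": 5,
--     "six": 6,
--     "seven": 7,
--     "eight": 8,
--     "nine": 9,
-- }
--
-- def read_digit(s: str) -> Optional[int]:
--     for word, value in spelled.items():
--         if s.startswith(word):
--             return value
--     return None
-- ===== Notes on version B (the rewrite author's own statement) =====
-- stated objective: idiomatic
-- what changed: B iterates over the nine spelled-out words and tests s.startswith(word), instead of A's loop over the first min(5,len(s)) character positions growing a buffer and probing the dict with each prefix; correctness rests on the key set being prefix-free.
import Mathlib
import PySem

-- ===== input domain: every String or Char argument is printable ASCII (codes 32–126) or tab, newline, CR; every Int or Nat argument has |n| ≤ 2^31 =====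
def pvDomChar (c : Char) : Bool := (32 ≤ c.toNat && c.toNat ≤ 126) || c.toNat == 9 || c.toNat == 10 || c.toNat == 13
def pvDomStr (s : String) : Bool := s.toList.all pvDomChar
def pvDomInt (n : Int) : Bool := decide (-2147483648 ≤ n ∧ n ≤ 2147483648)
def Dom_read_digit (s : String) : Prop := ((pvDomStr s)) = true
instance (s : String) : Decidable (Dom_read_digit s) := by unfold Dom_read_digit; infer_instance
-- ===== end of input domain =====

-- B scans the nine spelled-out words with startswith instead of growing a character buffer index by index; same result.

-- the module-level dict `spelled`; keys held as code-point lists (exact: the keys are ASCII)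
def pvSpelled : PySem.Dict (List Char) Int :=
  PySem.Dict.mk [("one".toList, 1), ("two".toList, 2), ("three".toList, 3),
    ("four".toList, 4), ("five".toList, 5), ("six".toList, 6),
    ("seven".toList, 7), ("eight".toList, 8), ("nine".toList, 9)]

-- ===== PORT A =====
-- `for j in range(end): buffer += s[j]; if spelled.get(buffer): return spelled.get(buffer)`
-- (`if spelled.get(buffer):` is truthy iff the lookup hits a key with a non-zero value)
def readDigitGo (l : List Char) (buffer : List Char) : List Int → Option Int
  | [] => none
  | j :: rest =>
    match PySem.List.pyGet? l j with
    | none => none   -- IndexError; unreachable since j < len(l)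
    | some c =>
      let buf := buffer ++ [c]
      match PySem.Dict.get? pvSpelled buf with
      | some v => if v ≠ 0 then some v else readDigitGo l buf rest
      | none => readDigitGo l buf rest

def read_digit (s : String) : Option Int :=
  readDigitGo s.toList [] (PySem.List.pyRange 0 (min 5 (PySem.Str.len s)) 1)

-- ===== PORT B =====
-- `for word, value in spelled.items(): if s.startswith(word): return value`
def readDigitScan (l : List Char) : List (List Char × Int) → Option Int
  | [] => none
  | (w, v) :: rest => if PySem.Chars.startswith l w then some v else readDigitScan l rest

def read_digit_alt (s : String) : Option Int :=
  readDigitScan s.toList pvSpelled.items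

-- ===== PRECONDITION & SPEC =====
def Spec_read_digit (s : String) (out : Option Int) : Prop := out = read_digit_alt s
instance (s : String) (out : Option Int) : Decidable (Spec_read_digit s out) := by unfold Spec_read_digit; infer_instance

-- ===== CLAIM (what is proved, stated in full; the proofs are below) =====
def Claim_equal_read_digit : Prop := ∀ (s : String), Dom_read_digit s → Spec_read_digit s (read_digit s)

-- ===== LEMMAS AND PROOFS =====

theorem pyGet?_lit (x : List Char) (n : Nat) (c : Char) (h : x[n]? = some c) :
    PySem.List.pyGet? x (OfNat.ofNat n) = some c := by
  rw [show (OfNat.ofNat n : Int) = ((n : Nat) : Int) from rfl, PySem.List.pyGet?_natCast, h]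

theorem get?_mk_nil (x : List Char) :
    (PySem.Dict.mk ([] : List (List Char × Int))).get? x = none := rfl

set_option maxHeartbeats 2000000 in
theorem case1 (a : Char) :
    readDigitGo [a] [] [0] = readDigitScan [a] pvSpelled.items := by
  have g0 : PySem.List.pyGet? [a] 0 = some a := pyGet?_lit _ 0 _ rfl
  simp only [readDigitGo, readDigitScan, g0, pvSpelled,
    PySem.Dict.get?_mk_cons, PySem.Chars.startswith, List.nil_append, get?_mk_nil]
  simp [List.isPrefixOf]

set_option maxHeartbeats 2000000 in
theorem case2 (a b : Char) :
    readDigitGo [a, b] [] [0, 1] = readDigitScan [a, b] pvSpelled.items := by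
  have g0 : PySem.List.pyGet? [a, b] 0 = some a := pyGet?_lit _ 0 _ rfl
  have g1 : PySem.List.pyGet? [a, b] 1 = some b := pyGet?_lit _ 1 _ rfl
  simp only [readDigitGo, readDigitScan, g0, g1, pvSpelled,
    PySem.Dict.get?_mk_cons, PySem.Chars.startswith, List.nil_append, get?_mk_nil]
  simp [List.isPrefixOf]

set_option maxHeartbeats 2000000 in
theorem case3 (a b c : Char) :
    readDigitGo [a, b, c] [] [0, 1, 2] = readDigitScan [a, b, c] pvSpelled.items := by
  have g0 : PySem.List.pyGet? [a, b, c] 0 = some a := pyGet?_lit _ 0 _ rfl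
  have g1 : PySem.List.pyGet? [a, b, c] 1 = some b := pyGet?_lit _ 1 _ rfl
  have g2 : PySem.List.pyGet? [a, b, c] 2 = some c := pyGet?_lit _ 2 _ rfl
  simp only [readDigitGo, readDigitScan, g0, g1, g2, pvSpelled,
    PySem.Dict.get?_mk_cons, PySem.Chars.startswith, List.nil_append, get?_mk_nil]
  simp [List.isPrefixOf]
  simp only [@eq_comm Char]
  split_ifs <;> simp_all

set_option maxHeartbeats 2000000 in
theorem case4 (a b c d : Char) :
    readDigitGo [a, b, c, d] [] [0, 1, 2, 3] = readDigitScan [a, b, c, d] pvSpelled.items := by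
  have g0 : PySem.List.pyGet? [a, b, c, d] 0 = some a := pyGet?_lit _ 0 _ rfl
  have g1 : PySem.List.pyGet? [a, b, c, d] 1 = some b := pyGet?_lit _ 1 _ rfl
  have g2 : PySem.List.pyGet? [a, b, c, d] 2 = some c := pyGet?_lit _ 2 _ rfl
  have g3 : PySem.List.pyGet? [a, b, c, d] 3 = some d := pyGet?_lit _ 3 _ rfl
  simp only [readDigitGo, readDigitScan, g0, g1, g2, g3, pvSpelled,
    PySem.Dict.get?_mk_cons, PySem.Chars.startswith, List.nil_append, get?_mk_nil]
  simp [List.isPrefixOf]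
  simp only [@eq_comm Char]
  split_ifs <;> simp_all

set_option maxHeartbeats 4000000 in
theorem case5 (a b c d e : Char) (rest : List Char) :
    readDigitGo (a :: b :: c :: d :: e :: rest) [] [0, 1, 2, 3, 4] =
      readDigitScan (a :: b :: c :: d :: e :: rest) pvSpelled.items := by
  have g0 : PySem.List.pyGet? (a::b::c::d::e::rest) 0 = some a := pyGet?_lit _ 0 _ rfl
  have g1 : PySem.List.pyGet? (a::b::c::d::e::rest) 1 = some b := pyGet?_lit _ 1 _ rfl
  have g2 : PySem.List.pyGet? (a::b::c::d::e::rest) 2 = some c := pyGet?_lit _ 2 _ rfl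
  have g3 : PySem.List.pyGet? (a::b::c::d::e::rest) 3 = some d := pyGet?_lit _ 3 _ rfl
  have g4 : PySem.List.pyGet? (a::b::c::d::e::rest) 4 = some e := pyGet?_lit _ 4 _ rfl
  simp only [readDigitGo, readDigitScan, g0, g1, g2, g3, g4, pvSpelled,
    PySem.Dict.get?_mk_cons, PySem.Chars.startswith, List.nil_append, get?_mk_nil]
  simp [List.isPrefixOf]
  simp only [@eq_comm Char]
  split_ifs <;> simp_all

theorem main_lemma (l : List Char) :
    readDigitGo l [] (PySem.List.pyRange 0 (min 5 ((l.length : Int))) 1) =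
      readDigitScan l pvSpelled.items := by
  match l with
  | [] => decide
  | [a] =>
    have hr : PySem.List.pyRange 0 (min 5 ((([a] : List Char).length : Int))) 1 = [0] := by
      simp only [List.length_cons, List.length_nil]; decide
    rw [hr]; exact case1 a
  | [a, b] =>
    have hr : PySem.List.pyRange 0 (min 5 ((([a, b] : List Char).length : Int))) 1 = [0, 1] := by
      simp only [List.length_cons, List.length_nil]; decide
    rw [hr]; exact case2 a b
  | [a, b, c] =>
    have hr : PySem.List.pyRange 0 (min 5 ((([a, b, c] : List Char).length : Int))) 1
        = [0, 1, 2] := by simp only [List.length_cons, List.length_nil]; decide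
    rw [hr]; exact case3 a b c
  | [a, b, c, d] =>
    have hr : PySem.List.pyRange 0 (min 5 ((([a, b, c, d] : List Char).length : Int))) 1
        = [0, 1, 2, 3] := by simp only [List.length_cons, List.length_nil]; decide
    rw [hr]; exact case4 a b c d
  | a :: b :: c :: d :: e :: rest =>
    have hm : min 5 (((a :: b :: c :: d :: e :: rest).length : Int)) = 5 := by
      simp only [List.length_cons]; push_cast; omega
    rw [hm, show PySem.List.pyRange 0 5 1 = [0, 1, 2, 3, 4] by decide]
    exact case5 a b c d e rest

-- ===== VERDICT (by name: the statement is the Claim_ definition above) =====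
theorem read_digit_spec : Claim_equal_read_digit := by
  intro s _
  unfold Spec_read_digit read_digit read_digit_alt
  rw [show PySem.Str.len s = ((s.toList.length : Int)) from by
    simp [PySem.Str.len_eq]]
  exact main_lemma s.toList
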